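-- pv_equiv track=rewrite | github.com/valgardg/leetcode | 485. Max Consecutive Ones/Solution.py | findMaxConsecutiveOnes
-- ===== SOURCE A (Python) =====
-- def findMaxConsecutiveOnes(nums):
--     """
--     :type nums: List[int]
--     :rtype: int
--     """
--     count = 0
--     maxcount = 0
--     for i in nums:
--         if i == 1:
--             count += 1
--         else:
--             count = 0
--         maxcount = max(maxcount, count)
--     return maxcount
-- ===== SOURCE B (Python) =====
-- def findMaxConsecutiveOnes(nums):
--     """
--     :type nums: List[int]
--     :rtype: int
--     """
--     best = 0
--     n = len(nums)
--     i = 0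
--     while i < n:
--         if nums[i] == 1:
--             j = i + 1
--             while j < n and nums[j] == 1:
--                 j += 1
--             if j - i > best:
--                 best = j - i
--             i = j
--         else:
--             i += 1
--     return best
-- ===== Notes on version B (the rewrite author's own statement) =====
-- stated objective: alternative
-- what changed: B is a two-pointer run scanner: an inner loop advances to the end of each maximal run of ones and its length is compared with the best once per run, instead of A's per-element counter with a running max updated at every element.
import Mathlib
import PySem

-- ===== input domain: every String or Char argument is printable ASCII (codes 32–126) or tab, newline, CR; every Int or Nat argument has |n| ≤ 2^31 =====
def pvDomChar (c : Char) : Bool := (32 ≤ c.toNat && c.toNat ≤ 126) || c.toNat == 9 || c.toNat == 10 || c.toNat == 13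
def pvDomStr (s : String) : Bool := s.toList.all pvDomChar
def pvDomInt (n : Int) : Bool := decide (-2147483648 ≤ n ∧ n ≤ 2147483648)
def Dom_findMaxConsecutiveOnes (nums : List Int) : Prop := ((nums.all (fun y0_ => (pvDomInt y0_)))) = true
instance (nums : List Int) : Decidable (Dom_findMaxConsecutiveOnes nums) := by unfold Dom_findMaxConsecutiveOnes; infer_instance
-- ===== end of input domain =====

-- B scans each maximal run of ones with an inner two-pointer loop instead of A's per-element counter with a running max (alternative decomposition).


-- ===== PORT A =====
-- literal port of A: fold over nums carrying (count, maxcount)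
def findMaxConsecutiveOnes (nums : List Int) : Int :=
  (nums.foldl (fun (s : Int × Int) i =>
      let count := if i = 1 then s.1 + 1 else (0 : Int)
      (count, max s.2 count)) (0, 0)).2

-- ===== PORT B =====
-- inner while loop of B: advance j to the end of the current run of ones
-- (fuel = number of indices left, a totality guard only; the loop body is B's)
def pvInner (nums : List Int) (n : Int) : Nat → Int → Int
  | 0, j => j
  | fuel + 1, j =>
    if j < n ∧ PySem.List.pyGet? nums j = some 1 then pvInner nums n fuel (j + 1)
    else j

-- outer while loop of B (same fuel guard)
def pvOuter (nums : List Int) (n : Int) : Nat → Int → Int → Int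
  | 0, _, best => best
  | fuel + 1, i, best =>
    if i < n then
      if PySem.List.pyGet? nums i = some 1 then
        let j := pvInner nums n fuel (i + 1)
        pvOuter nums n fuel j (if j - i > best then j - i else best)
      else pvOuter nums n fuel (i + 1) best
    else best

def findMaxConsecutiveOnes_alt (nums : List Int) : Int :=
  pvOuter nums nums.length nums.length 0 0

-- ===== PRECONDITION & SPEC =====
def Spec_findMaxConsecutiveOnes (nums : List Int) (out : Int) : Prop := out = findMaxConsecutiveOnes_alt nums
instance (nums : List Int) (out : Int) : Decidable (Spec_findMaxConsecutiveOnes nums out) := by unfold Spec_findMaxConsecutiveOnes; infer_instance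

-- ===== CLAIM (what is proved, stated in full; the proofs are below) =====
def Claim_equal_findMaxConsecutiveOnes : Prop := ∀ (nums : List Int), Dom_findMaxConsecutiveOnes nums → Spec_findMaxConsecutiveOnes nums (findMaxConsecutiveOnes nums)

-- ===== LEMMAS AND PROOFS =====

-- proof-side list view of B's run scan: leading run of ones and the remainder
def pvOnesRun : List Int → Int × List Int
  | [] => (0, [])
  | x :: xs =>
    if x = 1 then
      let p := pvOnesRun xs
      (p.1 + 1, p.2)
    else (0, x :: xs)

theorem pvOnesRun_len_le : ∀ (l : List Int), (pvOnesRun l).2.length ≤ l.length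
  | [] => by simp [pvOnesRun]
  | x :: xs => by
    simp only [pvOnesRun]
    split
    · exact le_trans (pvOnesRun_len_le xs) (Nat.le_succ _)
    · simp

-- proof-side list view of B's outer loop
def pvAltGo : List Int → Int → Int
  | [], best => best
  | x :: xs, best =>
    if x = 1 then
      let p := pvOnesRun xs
      pvAltGo p.2 (max best (p.1 + 1))
    else pvAltGo xs best
termination_by l _ => l.length
decreasing_by
  · exact Nat.lt_succ_of_le (pvOnesRun_len_le xs)
  · simp

-- pvH l c: the maximum count value produced while folding A's loop over l starting from count c (0 if l = [])
def pvH : List Int → Int → Int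
  | [], _ => 0
  | x :: xs, c => if x = 1 then max (c + 1) (pvH xs (c + 1)) else max 0 (pvH xs 0)

theorem pvH_nonneg : ∀ (l : List Int) (c : Int), 0 ≤ pvH l c
  | [], _ => le_refl 0
  | x :: xs, c => by
    simp only [pvH]
    split
    · exact le_trans (pvH_nonneg xs (c + 1)) (le_max_right _ _)
    · exact le_max_left _ _

theorem foldA_eq_max : ∀ (l : List Int) (c m : Int), 0 ≤ c → 0 ≤ m →
    (l.foldl (fun (s : Int × Int) i =>
      let count := if i = 1 then s.1 + 1 else (0 : Int)
      (count, max s.2 count)) (c, m)).2 = max m (pvH l c)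
  | [], c, m, hc, hm => by simp [pvH]; omega
  | x :: xs, c, m, hc, hm => by
    by_cases hx : x = 1
    · simp only [List.foldl, pvH, hx, reduceIte]
      rw [foldA_eq_max xs (c + 1) (max m (c + 1)) (by omega) (by omega)]
      omega
    · simp only [List.foldl, pvH, hx, reduceIte]
      rw [foldA_eq_max xs 0 (max m 0) (le_refl 0) (by omega)]
      omega

theorem pvOnesRun_nonneg : ∀ (l : List Int), 0 ≤ (pvOnesRun l).1
  | [] => le_refl 0
  | x :: xs => by
    simp only [pvOnesRun]
    split
    · have := pvOnesRun_nonneg xs; simp; omega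
    · simp

theorem pvOnesRun_spec : ∀ (l : List Int) (c : Int),
    max c (pvH l c) = max (c + (pvOnesRun l).1) (pvH (pvOnesRun l).2 0)
  | [], c => by simp [pvOnesRun, pvH]
  | x :: xs, c => by
    by_cases hx : x = 1
    · simp only [pvOnesRun, pvH, hx, reduceIte]
      have ih := pvOnesRun_spec xs (c + 1)
      omega
    · simp only [pvOnesRun, pvH, hx, reduceIte]
      omega

theorem pvAltGo_eq : ∀ (n : ℕ) (l : List Int), l.length ≤ n → ∀ (best : Int), 0 ≤ best →
    pvAltGo l best = max best (pvH l 0) := by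
  intro n
  induction n with
  | zero =>
    intro l hl best hb
    have : l = [] := List.eq_nil_of_length_eq_zero (Nat.le_zero.mp hl)
    subst this
    simp [pvAltGo, pvH]; omega
  | succ n ih =>
    intro l hl best hb
    match l with
    | [] => simp [pvAltGo, pvH]; omega
    | x :: xs =>
      by_cases hx : x = 1
      · rw [pvAltGo, if_pos hx]
        have hlen : (pvOnesRun xs).2.length ≤ n :=
          le_trans (pvOnesRun_len_le xs) (by simpa using Nat.succ_le_succ_iff.mp hl)
        have h2 := pvOnesRun_nonneg xs
        rw [ih (pvOnesRun xs).2 hlen (max best ((pvOnesRun xs).1 + 1)) (by omega)]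
        have h1 := pvOnesRun_spec xs 1
        have h3 := pvH_nonneg (pvOnesRun xs).2 0
        have h4 := pvH_nonneg xs 1
        simp only [pvH, hx, reduceIte, zero_add]
        omega
      · rw [pvAltGo, if_neg hx]
        rw [ih xs (by simpa using Nat.succ_le_succ_iff.mp hl) best hb]
        have h1 := pvH_nonneg xs 0
        simp only [pvH, hx, reduceIte]
        omega

-- bridge: the index-based inner loop computes the leading-run view on the dropped suffix
theorem pvInner_spec : ∀ (fuel : Nat) (nums : List Int) (j : Int), 0 ≤ j →
    ((nums.length : Int) - j).toNat ≤ fuel →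
    pvInner nums nums.length fuel j = j + (pvOnesRun (nums.drop j.toNat)).1 ∧
    (pvOnesRun (nums.drop j.toNat)).2 = nums.drop (pvInner nums nums.length fuel j).toNat := by
  intro fuel
  induction fuel with
  | zero =>
    intro nums j hj hfuel
    have : nums.drop j.toNat = [] := List.drop_eq_nil_of_le (by omega)
    rw [this]
    simp [pvInner, pvOnesRun, this]
  | succ fuel ih =>
    intro nums j hj hfuel
    rw [pvInner]
    by_cases hjn : j < (nums.length : Int)
    · have hlt : j.toNat < nums.length := by omega
      have hdrop : nums.drop j.toNat = nums[j.toNat] :: nums.drop (j.toNat + 1) :=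
        (List.getElem_cons_drop hlt).symm
      have hget : PySem.List.pyGet? nums j = some nums[j.toNat] := by
        rw [PySem.List.pyGet?_of_nonneg (h := hj)]
        simp [List.getElem?_eq_getElem hlt]
      by_cases hx : nums[j.toNat] = (1 : Int)
      · rw [if_pos ⟨hjn, by rw [hget, hx]⟩]
        have hrec := ih nums (j + 1) (by omega) (by omega)
        have ht : (j + 1).toNat = j.toNat + 1 := by omega
        rw [ht] at hrec
        rw [hdrop]
        simp only [pvOnesRun, hx, reduceIte]
        exact ⟨by omega, hrec.2⟩
      · rw [if_neg (by intro h; exact hx (by simpa [hget] using h.2))]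
        rw [hdrop]
        simp only [pvOnesRun, hx, reduceIte]
        exact ⟨by omega, by simp⟩
    · rw [if_neg (by intro h; exact hjn h.1)]
      have : nums.drop j.toNat = [] := List.drop_eq_nil_of_le (by omega)
      rw [this]
      simp [pvOnesRun]

-- bridge: the index-based outer loop computes the list view on the dropped suffix
theorem pvOuter_spec : ∀ (fuel : Nat) (nums : List Int) (i best : Int), 0 ≤ i →
    ((nums.length : Int) - i).toNat ≤ fuel →
    pvOuter nums nums.length fuel i best = pvAltGo (nums.drop i.toNat) best := by
  intro fuel
  induction fuel with
  | zero =>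
    intro nums i best hi hfuel
    have : nums.drop i.toNat = [] := List.drop_eq_nil_of_le (by omega)
    rw [this]
    simp [pvOuter, pvAltGo]
  | succ fuel ih =>
    intro nums i best hi hfuel
    rw [pvOuter]
    by_cases hin : i < (nums.length : Int)
    · rw [if_pos hin]
      have hlt : i.toNat < nums.length := by omega
      have hdrop : nums.drop i.toNat = nums[i.toNat] :: nums.drop (i.toNat + 1) :=
        (List.getElem_cons_drop hlt).symm
      have hget : PySem.List.pyGet? nums i = some nums[i.toNat] := by
        rw [PySem.List.pyGet?_of_nonneg (h := hi)]
        simp [List.getElem?_eq_getElem hlt]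
      have ht : (i + 1).toNat = i.toNat + 1 := by omega
      by_cases hx : nums[i.toNat] = (1 : Int)
      · rw [if_pos (by rw [hget, hx])]
        have hinner := pvInner_spec fuel nums (i + 1) (by omega) (by omega)
        rw [ht] at hinner
        have hr := pvOnesRun_nonneg (nums.drop (i.toNat + 1))
        rw [ih nums (pvInner nums nums.length fuel (i + 1)) _ (by omega) (by omega)]
        rw [hdrop, pvAltGo, if_pos hx]
        rw [← hinner.2]
        congr 1
        rw [max_def]
        split_ifs <;> omega
      · rw [if_neg (by rw [hget]; intro h; exact hx (by simpa using h))]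
        rw [ih nums (i + 1) best (by omega) (by omega), ht, hdrop, pvAltGo, if_neg hx]
    · rw [if_neg hin]
      have : nums.drop i.toNat = [] := List.drop_eq_nil_of_le (by omega)
      rw [this, pvAltGo]

-- ===== VERDICT (by name: the statement is the Claim_ definition above) =====
theorem findMaxConsecutiveOnes_spec : Claim_equal_findMaxConsecutiveOnes := by
  intro nums _
  unfold Spec_findMaxConsecutiveOnes findMaxConsecutiveOnes findMaxConsecutiveOnes_alt
  rw [foldA_eq_max nums 0 0 (le_refl 0) (le_refl 0),
      pvOuter_spec nums.length nums 0 0 (le_refl 0) (by omega)]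
  simp only [Int.toNat_zero, List.drop_zero]
  rw [pvAltGo_eq nums.length nums (le_refl _) 0 (le_refl 0)]
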